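-- pv_equiv track=rewrite | github.com/noob111111/Paint | Paint.py | apply_blur
-- ===== SOURCE A (Python) =====
-- def _hex_to_rgb(h):
--     h = h.lstrip("#")
--     return int(h[0:2], 16), int(h[2:4], 16), int(h[4:6], 16)
--
-- def _rgb_to_hex(r, g, b):
--     return f"#{int(r):02X}{int(g):02X}{int(b):02X}"
--
-- def apply_blur(rgb_values, grid_points, cols, rows):
--     grid_2d  = [[grid_points[r*cols + c] for c in range(cols)] for r in range(rows)]
--     color_2d = [[rgb_values[ r*cols + c] for c in range(cols)] for r in range(rows)]
--     new_cols  = 2 * cols - 1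
--     new_rows  = 2 * rows - 1
--     new_grid   = []
--     new_colors = []
--     fake_mask  = []
--
--     for r in range(new_rows):
--         for c in range(new_cols):
--             or_, oc = r // 2, c // 2
--             if r % 2 == 0 and c % 2 == 0:
--                 new_grid.append(grid_2d[or_][oc])
--                 new_colors.append(color_2d[or_][oc])
--                 fake_mask.append(False)
--             elif r % 2 == 0:
--                 x = (grid_2d[or_][oc][0] + grid_2d[or_][oc+1][0]) / 2
--                 y = (grid_2d[or_][oc][1] + grid_2d[or_][oc+1][1]) / 2
--                 a, b_ = _hex_to_rgb(color_2d[or_][oc]), _hex_to_rgb(color_2d[or_][oc+1])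
--                 new_grid.append((round(x), round(y)))
--                 new_colors.append(_rgb_to_hex((a[0]+b_[0])//2,(a[1]+b_[1])//2,(a[2]+b_[2])//2))
--                 fake_mask.append(True)
--             elif c % 2 == 0:
--                 x = (grid_2d[or_][oc][0] + grid_2d[or_+1][oc][0]) / 2
--                 y = (grid_2d[or_][oc][1] + grid_2d[or_+1][oc][1]) / 2
--                 a, b_ = _hex_to_rgb(color_2d[or_][oc]), _hex_to_rgb(color_2d[or_+1][oc])
--                 new_grid.append((round(x), round(y)))
--                 new_colors.append(_rgb_to_hex((a[0]+b_[0])//2,(a[1]+b_[1])//2,(a[2]+b_[2])//2))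
--                 fake_mask.append(True)
--             else:
--                 pts  = [grid_2d[or_][oc], grid_2d[or_][oc+1],
--                         grid_2d[or_+1][oc], grid_2d[or_+1][oc+1]]
--                 rgbs = [_hex_to_rgb(color_2d[or_][oc]),   _hex_to_rgb(color_2d[or_][oc+1]),
--                         _hex_to_rgb(color_2d[or_+1][oc]), _hex_to_rgb(color_2d[or_+1][oc+1])]
--                 x = sum(p[0] for p in pts) / 4
--                 y = sum(p[1] for p in pts) / 4
--                 new_grid.append((round(x), round(y)))
--                 new_colors.append(_rgb_to_hex(sum(r[0] for r in rgbs)//4,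
--                                               sum(r[1] for r in rgbs)//4,
--                                               sum(r[2] for r in rgbs)//4))
--                 fake_mask.append(True)
--
--     return new_colors, new_grid, fake_mask
-- ===== SOURCE B (Python) =====
-- def _hex_to_rgb(h):
--     h = h.lstrip("#")
--     return int(h[0:2], 16), int(h[2:4], 16), int(h[4:6], 16)
--
-- def _rgb_to_hex(r, g, b):
--     return f"#{int(r):02X}{int(g):02X}{int(b):02X}"
--
-- def apply_blur(rgb_values, grid_points, cols, rows):
--     # Row-by-row sweep over the SOURCE grid: for each source row emit the even
--     # output row (original cells interleaved with horizontal midpoints) and,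
--     # if a row follows, the odd output row (vertical midpoints interleaved
--     # with centers averaged directly from the four corners).
--     new_colors, new_grid, fake_mask = [], [], []
--
--     def pt(r, c):
--         return grid_points[r * cols + c]
--
--     def rgb(r, c):
--         return _hex_to_rgb(rgb_values[r * cols + c])
--
--     for r in range(rows):
--         for c in range(cols):
--             new_grid.append(pt(r, c))
--             new_colors.append(rgb_values[r * cols + c])
--             fake_mask.append(False)
--             if c < cols - 1:
--                 p, q = pt(r, c), pt(r, c + 1)
--                 a, b = rgb(r, c), rgb(r, c + 1)
--                 new_grid.append((round((p[0] + q[0]) / 2), round((p[1] + q[1]) / 2)))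
--                 new_colors.append(_rgb_to_hex((a[0] + b[0]) // 2, (a[1] + b[1]) // 2, (a[2] + b[2]) // 2))
--                 fake_mask.append(True)
--         if r < rows - 1:
--             for c in range(cols):
--                 p, q = pt(r, c), pt(r + 1, c)
--                 a, b = rgb(r, c), rgb(r + 1, c)
--                 new_grid.append((round((p[0] + q[0]) / 2), round((p[1] + q[1]) / 2)))
--                 new_colors.append(_rgb_to_hex((a[0] + b[0]) // 2, (a[1] + b[1]) // 2, (a[2] + b[2]) // 2))
--                 fake_mask.append(True)
--                 if c < cols - 1:
--                     ps = [pt(r, c), pt(r, c + 1), pt(r + 1, c), pt(r + 1, c + 1)]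
--                     rs = [rgb(r, c), rgb(r, c + 1), rgb(r + 1, c), rgb(r + 1, c + 1)]
--                     new_grid.append((round(sum(p[0] for p in ps) / 4), round(sum(p[1] for p in ps) / 4)))
--                     new_colors.append(_rgb_to_hex(sum(t[0] for t in rs) // 4,
--                                                  sum(t[1] for t in rs) // 4,
--                                                  sum(t[2] for t in rs) // 4))
--                     fake_mask.append(True)
--     return new_colors, new_grid, fake_mask
-- ===== Notes on version B (the rewrite author's own statement) =====
-- stated objective: alternative
-- what changed: B replaces A's single flat loop over the 2*rows-1 by 2*cols-1 target grid (four parity branches, //2 index arithmetic, precomputed 2D lists) by a row-by-row sweep over the source grid that emits each even output row (original cells interleaved with horizontal midpoints) and then, when a row follows, the odd output row (vertical midpoints interleaved with four-corner centers), indexing the flat input lists directly.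
import Mathlib
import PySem

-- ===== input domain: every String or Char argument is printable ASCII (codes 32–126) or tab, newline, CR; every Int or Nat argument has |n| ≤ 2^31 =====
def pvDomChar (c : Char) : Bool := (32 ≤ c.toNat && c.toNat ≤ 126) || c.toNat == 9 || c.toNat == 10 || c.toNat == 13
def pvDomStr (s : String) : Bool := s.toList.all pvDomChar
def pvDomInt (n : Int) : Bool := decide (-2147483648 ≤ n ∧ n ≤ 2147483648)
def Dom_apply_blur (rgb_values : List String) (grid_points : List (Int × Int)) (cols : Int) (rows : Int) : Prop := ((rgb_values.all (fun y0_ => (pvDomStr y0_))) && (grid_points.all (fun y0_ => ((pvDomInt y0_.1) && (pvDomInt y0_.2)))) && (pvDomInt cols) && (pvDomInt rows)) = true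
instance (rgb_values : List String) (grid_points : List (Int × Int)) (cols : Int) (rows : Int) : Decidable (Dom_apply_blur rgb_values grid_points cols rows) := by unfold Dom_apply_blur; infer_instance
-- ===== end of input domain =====

-- B replaces A's single flat loop over the target grid (four parity branches, //2 index
-- arithmetic into precomputed 2D lists) by a row-by-row sweep over the SOURCE grid
-- (objective: alternative decomposition, same asymptotic cost).

-- ===== shared helpers (both Python versions call the same module helpers _hex_to_rgb /
-- _rgb_to_hex and the builtin round(); these are their ports) =====

-- int(h[i:j], 16) of h.lstrip('#') via PySem.Int.ofCharsBase?; `.getD 0` is irrelevant under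
-- Pre_ (ValueError excluded)
def hexToRgb (h : String) : Int × Int × Int :=
  let t := h.toList.dropWhile (fun c => c == '#')
  ((PySem.Int.ofCharsBase? (t.take 2) 16).getD 0,
   (PySem.Int.ofCharsBase? ((t.drop 2).take 2) 16).getD 0,
   (PySem.Int.ofCharsBase? ((t.drop 4).take 2) 16).getD 0)

def hexChar (n : Nat) : Char := "0123456789ABCDEF".toList.getD n '0'

-- f"{v:02X}": exact for |v| ≤ 255 (the only values reaching it: averages of int(2 hex chars, 16))
def hex2 (v : Int) : List Char :=
  if v < 0 then
    (if v.natAbs < 16 then ['-', hexChar v.natAbs]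
     else ['-', hexChar (v.natAbs / 16), hexChar (v.natAbs % 16)])
  else if v.natAbs < 16 then ['0', hexChar v.natAbs]
  else [hexChar (v.natAbs / 16), hexChar (v.natAbs % 16)]

-- f"#{r:02X}{g:02X}{b:02X}"
def rgbToHex (r g b : Int) : String := String.ofList ('#' :: (hex2 r ++ hex2 g ++ hex2 b))

-- round(s / 2): s/2 is exact in a float for |s| ≤ 2^32, so this is Python's
-- round-half-to-even applied to the exact value s/2
def pyRound2 (s : Int) : Int :=
  if PySem.Int.mod s 2 = 0 then PySem.Int.floordiv s 2
  else (let q := PySem.Int.floordiv s 2; if PySem.Int.mod q 2 = 0 then q else q + 1)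

-- round(s / 4): likewise exact for |s| ≤ 2^33
def pyRound4 (s : Int) : Int :=
  let q := PySem.Int.floordiv s 4
  let r := PySem.Int.mod s 4
  if r = 0 then q
  else if r = 1 then q
  else if r = 2 then (if PySem.Int.mod q 2 = 0 then q else q + 1)
  else q + 1

-- ===== PORT A =====
-- the body of A's inner `for c in range(new_cols)` loop (named so the proofs can speak about it)
def innerBodyA (grid_2d : List (List (Int × Int))) (color_2d : List (List String))
    (r : Int) (st : List (Int × Int) × List String × List Bool) (c : Int) :
    List (Int × Int) × List String × List Bool :=
  let or_ := PySem.Int.floordiv r 2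
  let oc := PySem.Int.floordiv c 2
  if PySem.Int.mod r 2 = 0 ∧ PySem.Int.mod c 2 = 0 then
    (st.1 ++ [PySem.List.pyGetD (PySem.List.pyGetD grid_2d or_ []) oc (0, 0)],
     st.2.1 ++ [PySem.List.pyGetD (PySem.List.pyGetD color_2d or_ []) oc ""],
     st.2.2 ++ [false])
  else if PySem.Int.mod r 2 = 0 then
    let g0 := PySem.List.pyGetD (PySem.List.pyGetD grid_2d or_ []) oc (0, 0)
    let g1 := PySem.List.pyGetD (PySem.List.pyGetD grid_2d or_ []) (oc + 1) (0, 0)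
    let a := hexToRgb (PySem.List.pyGetD (PySem.List.pyGetD color_2d or_ []) oc "")
    let b := hexToRgb (PySem.List.pyGetD (PySem.List.pyGetD color_2d or_ []) (oc + 1) "")
    (st.1 ++ [(pyRound2 (g0.1 + g1.1), pyRound2 (g0.2 + g1.2))],
     st.2.1 ++ [rgbToHex (PySem.Int.floordiv (a.1 + b.1) 2)
                         (PySem.Int.floordiv (a.2.1 + b.2.1) 2)
                         (PySem.Int.floordiv (a.2.2 + b.2.2) 2)],
     st.2.2 ++ [true])
  else if PySem.Int.mod c 2 = 0 then
    let g0 := PySem.List.pyGetD (PySem.List.pyGetD grid_2d or_ []) oc (0, 0)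
    let g1 := PySem.List.pyGetD (PySem.List.pyGetD grid_2d (or_ + 1) []) oc (0, 0)
    let a := hexToRgb (PySem.List.pyGetD (PySem.List.pyGetD color_2d or_ []) oc "")
    let b := hexToRgb (PySem.List.pyGetD (PySem.List.pyGetD color_2d (or_ + 1) []) oc "")
    (st.1 ++ [(pyRound2 (g0.1 + g1.1), pyRound2 (g0.2 + g1.2))],
     st.2.1 ++ [rgbToHex (PySem.Int.floordiv (a.1 + b.1) 2)
                         (PySem.Int.floordiv (a.2.1 + b.2.1) 2)
                         (PySem.Int.floordiv (a.2.2 + b.2.2) 2)],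
     st.2.2 ++ [true])
  else
    let p0 := PySem.List.pyGetD (PySem.List.pyGetD grid_2d or_ []) oc (0, 0)
    let p1 := PySem.List.pyGetD (PySem.List.pyGetD grid_2d or_ []) (oc + 1) (0, 0)
    let p2 := PySem.List.pyGetD (PySem.List.pyGetD grid_2d (or_ + 1) []) oc (0, 0)
    let p3 := PySem.List.pyGetD (PySem.List.pyGetD grid_2d (or_ + 1) []) (oc + 1) (0, 0)
    let c0 := hexToRgb (PySem.List.pyGetD (PySem.List.pyGetD color_2d or_ []) oc "")
    let c1 := hexToRgb (PySem.List.pyGetD (PySem.List.pyGetD color_2d or_ []) (oc + 1) "")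
    let c2 := hexToRgb (PySem.List.pyGetD (PySem.List.pyGetD color_2d (or_ + 1) []) oc "")
    let c3 := hexToRgb (PySem.List.pyGetD (PySem.List.pyGetD color_2d (or_ + 1) []) (oc + 1) "")
    (st.1 ++ [(pyRound4 (p0.1 + p1.1 + p2.1 + p3.1), pyRound4 (p0.2 + p1.2 + p2.2 + p3.2))],
     st.2.1 ++ [rgbToHex (PySem.Int.floordiv (c0.1 + c1.1 + c2.1 + c3.1) 4)
                         (PySem.Int.floordiv (c0.2.1 + c1.2.1 + c2.2.1 + c3.2.1) 4)
                         (PySem.Int.floordiv (c0.2.2 + c1.2.2 + c2.2.2 + c3.2.2) 4)],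
     st.2.2 ++ [true])

def apply_blur (rgb_values : List String) (grid_points : List (Int × Int)) (cols : Int) (rows : Int) : List String × (List (Int × Int)) × List Bool :=
  let grid_2d : List (List (Int × Int)) :=
    (PySem.List.pyRange 0 rows 1).map (fun r =>
      (PySem.List.pyRange 0 cols 1).map (fun c => PySem.List.pyGetD grid_points (r * cols + c) (0, 0)))
  let color_2d : List (List String) :=
    (PySem.List.pyRange 0 rows 1).map (fun r =>
      (PySem.List.pyRange 0 cols 1).map (fun c => PySem.List.pyGetD rgb_values (r * cols + c) ""))
  let new_cols := 2 * cols - 1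
  let new_rows := 2 * rows - 1
  let st :=
    (PySem.List.pyRange 0 new_rows 1).foldl (fun st r =>
      (PySem.List.pyRange 0 new_cols 1).foldl (innerBodyA grid_2d color_2d r) st)
      (([], [], []) : List (Int × Int) × List String × List Bool)
  (st.2.1, st.1, st.2.2)

-- ===== PORT B =====
-- B's accessors pt(r, c) / rgb(r, c)
def ptB (grid_points : List (Int × Int)) (cols r c : Int) : Int × Int :=
  PySem.List.pyGetD grid_points (r * cols + c) (0, 0)

def rgbB (rgb_values : List String) (cols r c : Int) : Int × Int × Int :=
  hexToRgb (PySem.List.pyGetD rgb_values (r * cols + c) "")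

-- the body of B's even-row `for c in range(cols)` loop: original cell, then a horizontal
-- midpoint when a column follows
def evenBodyB (rgb_values : List String) (grid_points : List (Int × Int)) (cols r : Int)
    (st : List (Int × Int) × List String × List Bool) (c : Int) :
    List (Int × Int) × List String × List Bool :=
  let st := (st.1 ++ [ptB grid_points cols r c],
             st.2.1 ++ [PySem.List.pyGetD rgb_values (r * cols + c) ""],
             st.2.2 ++ [false])
  if c < cols - 1 then
    let p := ptB grid_points cols r c
    let q := ptB grid_points cols r (c + 1)
    let a := rgbB rgb_values cols r c
    let b := rgbB rgb_values cols r (c + 1)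
    (st.1 ++ [(pyRound2 (p.1 + q.1), pyRound2 (p.2 + q.2))],
     st.2.1 ++ [rgbToHex (PySem.Int.floordiv (a.1 + b.1) 2)
                         (PySem.Int.floordiv (a.2.1 + b.2.1) 2)
                         (PySem.Int.floordiv (a.2.2 + b.2.2) 2)],
     st.2.2 ++ [true])
  else st

-- the body of B's odd-row `for c in range(cols)` loop: vertical midpoint, then a center
-- averaged directly from the four corners when a column follows
def oddBodyB (rgb_values : List String) (grid_points : List (Int × Int)) (cols r : Int)
    (st : List (Int × Int) × List String × List Bool) (c : Int) :
    List (Int × Int) × List String × List Bool :=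
  let p := ptB grid_points cols r c
  let q := ptB grid_points cols (r + 1) c
  let a := rgbB rgb_values cols r c
  let b := rgbB rgb_values cols (r + 1) c
  let st := (st.1 ++ [(pyRound2 (p.1 + q.1), pyRound2 (p.2 + q.2))],
             st.2.1 ++ [rgbToHex (PySem.Int.floordiv (a.1 + b.1) 2)
                                 (PySem.Int.floordiv (a.2.1 + b.2.1) 2)
                                 (PySem.Int.floordiv (a.2.2 + b.2.2) 2)],
             st.2.2 ++ [true])
  if c < cols - 1 then
    let ps := [ptB grid_points cols r c, ptB grid_points cols r (c + 1),
               ptB grid_points cols (r + 1) c, ptB grid_points cols (r + 1) (c + 1)]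
    let rs := [rgbB rgb_values cols r c, rgbB rgb_values cols r (c + 1),
               rgbB rgb_values cols (r + 1) c, rgbB rgb_values cols (r + 1) (c + 1)]
    (st.1 ++ [(pyRound4 ((ps.map (·.1)).sum), pyRound4 ((ps.map (·.2)).sum))],
     st.2.1 ++ [rgbToHex (PySem.Int.floordiv ((rs.map (·.1)).sum) 4)
                         (PySem.Int.floordiv ((rs.map (·.2.1)).sum) 4)
                         (PySem.Int.floordiv ((rs.map (·.2.2)).sum) 4)],
     st.2.2 ++ [true])
  else st

def apply_blur_alt (rgb_values : List String) (grid_points : List (Int × Int)) (cols : Int) (rows : Int) : List String × (List (Int × Int)) × List Bool :=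
  let st :=
    (PySem.List.pyRange 0 rows 1).foldl (fun st r =>
      let st := (PySem.List.pyRange 0 cols 1).foldl (evenBodyB rgb_values grid_points cols r) st
      if r < rows - 1 then
        (PySem.List.pyRange 0 cols 1).foldl (oddBodyB rgb_values grid_points cols r) st
      else st)
      (([], [], []) : List (Int × Int) × List String × List Bool)
  (st.2.1, st.1, st.2.2)

-- ===== PRECONDITION & SPEC =====

-- the three 2-char slices of h.lstrip('#') all parse with int(·, 16) (no ValueError)
def ParseOK (s : String) : Bool :=
  let t := s.toList.dropWhile (fun c => c == '#')
  (PySem.Int.ofCharsBase? (t.take 2) 16).isSome &&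
  (PySem.Int.ofCharsBase? ((t.drop 2).take 2) 16).isSome &&
  (PySem.Int.ofCharsBase? ((t.drop 4).take 2) 16).isSome

-- Pre_ excludes exactly the inputs where Python A raises: a flat index r*cols+c beyond the
-- list lengths (IndexError), or — when any midpoint is formed, i.e. rows ≥ 2 or cols ≥ 2 —
-- a used colour string whose 2-char slices do not parse as base-16 ints (ValueError).
def Pre_apply_blur (rgb_values : List String) (grid_points : List (Int × Int)) (cols : Int) (rows : Int) : Prop :=
  0 < rows → 0 < cols →
    ((rows * cols).toNat ≤ grid_points.length ∧ (rows * cols).toNat ≤ rgb_values.length ∧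
     ((2 ≤ rows ∨ 2 ≤ cols) → ∀ s ∈ rgb_values.take (rows * cols).toNat, ParseOK s = true))
instance (rgb_values : List String) (grid_points : List (Int × Int)) (cols : Int) (rows : Int) : Decidable (Pre_apply_blur rgb_values grid_points cols rows) := by unfold Pre_apply_blur; infer_instance

def pvWitness_apply_blur : List String × (List (Int × Int)) × Int × Int :=
  (["#000000", "#FF0000", "#00FF00", "#0000FF"], ([(0, 0), (2, 0), (0, 2), (2, 2)], 2, 2))

def Spec_apply_blur (rgb_values : List String) (grid_points : List (Int × Int)) (cols : Int) (rows : Int) (out : List String × (List (Int × Int)) × List Bool) : Prop := out = apply_blur_alt rgb_values grid_points cols rows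
instance (rgb_values : List String) (grid_points : List (Int × Int)) (cols : Int) (rows : Int) (out : List String × (List (Int × Int)) × List Bool) : Decidable (Spec_apply_blur rgb_values grid_points cols rows out) := by unfold Spec_apply_blur; infer_instance

-- ===== CLAIM (what is proved, stated in full; the proofs are below) =====
def Claim_equal_apply_blur : Prop := ∀ (rgb_values : List String) (grid_points : List (Int × Int)) (cols : Int) (rows : Int), Dom_apply_blur rgb_values grid_points cols rows → Pre_apply_blur rgb_values grid_points cols rows → Spec_apply_blur rgb_values grid_points cols rows (apply_blur rgb_values grid_points cols rows)

-- ===== LEMMAS AND PROOFS =====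

-- ---- generic three-list accumulator folds ----
lemma foldl3_map {α β γ δ : Type} (l : List α) (e : α → β × γ × δ) (st : List β × List γ × List δ) :
    l.foldl (fun st x => (st.1 ++ [(e x).1], st.2.1 ++ [(e x).2.1], st.2.2 ++ [(e x).2.2])) st
    = (st.1 ++ l.map (fun x => (e x).1), st.2.1 ++ l.map (fun x => (e x).2.1),
       st.2.2 ++ l.map (fun x => (e x).2.2)) := by
  induction l generalizing st with
  | nil => simp
  | cons x l ih => obtain ⟨a, b, c⟩ := st; simp [ih]

lemma foldl3_flat {α β γ δ : Type} (l : List α) (e : α → List (β × γ × δ)) (st : List β × List γ × List δ) :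
    l.foldl (fun st x => (st.1 ++ (e x).map (·.1), st.2.1 ++ (e x).map (·.2.1), st.2.2 ++ (e x).map (·.2.2))) st
    = (st.1 ++ (l.flatMap e).map (·.1), st.2.1 ++ (l.flatMap e).map (·.2.1),
       st.2.2 ++ (l.flatMap e).map (·.2.2)) := by
  induction l generalizing st with
  | nil => simp
  | cons x l ih => obtain ⟨a, b, c⟩ := st; simp [ih]

-- ---- the element A appends at target cell (r, c) ----
def cellA (grid_2d : List (List (Int × Int))) (color_2d : List (List String)) (r c : Int) :
    (Int × Int) × String × Bool :=
  let or_ := PySem.Int.floordiv r 2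
  let oc := PySem.Int.floordiv c 2
  if PySem.Int.mod r 2 = 0 ∧ PySem.Int.mod c 2 = 0 then
    (PySem.List.pyGetD (PySem.List.pyGetD grid_2d or_ []) oc (0, 0),
     PySem.List.pyGetD (PySem.List.pyGetD color_2d or_ []) oc "", false)
  else if PySem.Int.mod r 2 = 0 then
    let g0 := PySem.List.pyGetD (PySem.List.pyGetD grid_2d or_ []) oc (0, 0)
    let g1 := PySem.List.pyGetD (PySem.List.pyGetD grid_2d or_ []) (oc + 1) (0, 0)
    let a := hexToRgb (PySem.List.pyGetD (PySem.List.pyGetD color_2d or_ []) oc "")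
    let b := hexToRgb (PySem.List.pyGetD (PySem.List.pyGetD color_2d or_ []) (oc + 1) "")
    ((pyRound2 (g0.1 + g1.1), pyRound2 (g0.2 + g1.2)),
     rgbToHex (PySem.Int.floordiv (a.1 + b.1) 2) (PySem.Int.floordiv (a.2.1 + b.2.1) 2)
              (PySem.Int.floordiv (a.2.2 + b.2.2) 2), true)
  else if PySem.Int.mod c 2 = 0 then
    let g0 := PySem.List.pyGetD (PySem.List.pyGetD grid_2d or_ []) oc (0, 0)
    let g1 := PySem.List.pyGetD (PySem.List.pyGetD grid_2d (or_ + 1) []) oc (0, 0)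
    let a := hexToRgb (PySem.List.pyGetD (PySem.List.pyGetD color_2d or_ []) oc "")
    let b := hexToRgb (PySem.List.pyGetD (PySem.List.pyGetD color_2d (or_ + 1) []) oc "")
    ((pyRound2 (g0.1 + g1.1), pyRound2 (g0.2 + g1.2)),
     rgbToHex (PySem.Int.floordiv (a.1 + b.1) 2) (PySem.Int.floordiv (a.2.1 + b.2.1) 2)
              (PySem.Int.floordiv (a.2.2 + b.2.2) 2), true)
  else
    let p0 := PySem.List.pyGetD (PySem.List.pyGetD grid_2d or_ []) oc (0, 0)
    let p1 := PySem.List.pyGetD (PySem.List.pyGetD grid_2d or_ []) (oc + 1) (0, 0)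
    let p2 := PySem.List.pyGetD (PySem.List.pyGetD grid_2d (or_ + 1) []) oc (0, 0)
    let p3 := PySem.List.pyGetD (PySem.List.pyGetD grid_2d (or_ + 1) []) (oc + 1) (0, 0)
    let c0 := hexToRgb (PySem.List.pyGetD (PySem.List.pyGetD color_2d or_ []) oc "")
    let c1 := hexToRgb (PySem.List.pyGetD (PySem.List.pyGetD color_2d or_ []) (oc + 1) "")
    let c2 := hexToRgb (PySem.List.pyGetD (PySem.List.pyGetD color_2d (or_ + 1) []) oc "")
    let c3 := hexToRgb (PySem.List.pyGetD (PySem.List.pyGetD color_2d (or_ + 1) []) (oc + 1) "")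
    ((pyRound4 (p0.1 + p1.1 + p2.1 + p3.1), pyRound4 (p0.2 + p1.2 + p2.2 + p3.2)),
     rgbToHex (PySem.Int.floordiv (c0.1 + c1.1 + c2.1 + c3.1) 4)
              (PySem.Int.floordiv (c0.2.1 + c1.2.1 + c2.2.1 + c3.2.1) 4)
              (PySem.Int.floordiv (c0.2.2 + c1.2.2 + c2.2.2 + c3.2.2) 4), true)

lemma innerBodyA_eq (g2 : List (List (Int × Int))) (c2 : List (List String)) (r : Int)
    (st : List (Int × Int) × List String × List Bool) (c : Int) :
    innerBodyA g2 c2 r st c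
    = (st.1 ++ [(cellA g2 c2 r c).1], st.2.1 ++ [(cellA g2 c2 r c).2.1],
       st.2.2 ++ [(cellA g2 c2 r c).2.2]) := by
  simp only [innerBodyA, cellA]
  split_ifs <;> rfl

-- ---- the elements B appends at source cell (r, c) ----
def oCell (rgb_values : List String) (grid_points : List (Int × Int)) (cols r c : Int) :
    (Int × Int) × String × Bool :=
  (ptB grid_points cols r c, PySem.List.pyGetD rgb_values (r * cols + c) "", false)

def hCell (rgb_values : List String) (grid_points : List (Int × Int)) (cols r c : Int) :
    (Int × Int) × String × Bool :=
  let p := ptB grid_points cols r c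
  let q := ptB grid_points cols r (c + 1)
  let a := rgbB rgb_values cols r c
  let b := rgbB rgb_values cols r (c + 1)
  ((pyRound2 (p.1 + q.1), pyRound2 (p.2 + q.2)),
   rgbToHex (PySem.Int.floordiv (a.1 + b.1) 2) (PySem.Int.floordiv (a.2.1 + b.2.1) 2)
            (PySem.Int.floordiv (a.2.2 + b.2.2) 2), true)

def vCell (rgb_values : List String) (grid_points : List (Int × Int)) (cols r c : Int) :
    (Int × Int) × String × Bool :=
  let p := ptB grid_points cols r c
  let q := ptB grid_points cols (r + 1) c
  let a := rgbB rgb_values cols r c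
  let b := rgbB rgb_values cols (r + 1) c
  ((pyRound2 (p.1 + q.1), pyRound2 (p.2 + q.2)),
   rgbToHex (PySem.Int.floordiv (a.1 + b.1) 2) (PySem.Int.floordiv (a.2.1 + b.2.1) 2)
            (PySem.Int.floordiv (a.2.2 + b.2.2) 2), true)

def cCell (rgb_values : List String) (grid_points : List (Int × Int)) (cols r c : Int) :
    (Int × Int) × String × Bool :=
  let ps := [ptB grid_points cols r c, ptB grid_points cols r (c + 1),
             ptB grid_points cols (r + 1) c, ptB grid_points cols (r + 1) (c + 1)]
  let rs := [rgbB rgb_values cols r c, rgbB rgb_values cols r (c + 1),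
             rgbB rgb_values cols (r + 1) c, rgbB rgb_values cols (r + 1) (c + 1)]
  ((pyRound4 ((ps.map (·.1)).sum), pyRound4 ((ps.map (·.2)).sum)),
   rgbToHex (PySem.Int.floordiv ((rs.map (·.1)).sum) 4)
            (PySem.Int.floordiv ((rs.map (·.2.1)).sum) 4)
            (PySem.Int.floordiv ((rs.map (·.2.2)).sum) 4), true)

def evList (rgb_values : List String) (grid_points : List (Int × Int)) (cols r c : Int) :
    List ((Int × Int) × String × Bool) :=
  [oCell rgb_values grid_points cols r c]
    ++ (if c < cols - 1 then [hCell rgb_values grid_points cols r c] else [])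

def odList (rgb_values : List String) (grid_points : List (Int × Int)) (cols r c : Int) :
    List ((Int × Int) × String × Bool) :=
  [vCell rgb_values grid_points cols r c]
    ++ (if c < cols - 1 then [cCell rgb_values grid_points cols r c] else [])

lemma evenBodyB_eq (rv : List String) (gp : List (Int × Int)) (cols r : Int)
    (st : List (Int × Int) × List String × List Bool) (c : Int) :
    evenBodyB rv gp cols r st c
    = (st.1 ++ (evList rv gp cols r c).map (·.1), st.2.1 ++ (evList rv gp cols r c).map (·.2.1),
       st.2.2 ++ (evList rv gp cols r c).map (·.2.2)) := by
  simp only [evenBodyB, evList, oCell, hCell]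
  split_ifs <;> simp

lemma oddBodyB_eq (rv : List String) (gp : List (Int × Int)) (cols r : Int)
    (st : List (Int × Int) × List String × List Bool) (c : Int) :
    oddBodyB rv gp cols r st c
    = (st.1 ++ (odList rv gp cols r c).map (·.1), st.2.1 ++ (odList rv gp cols r c).map (·.2.1),
       st.2.2 ++ (odList rv gp cols r c).map (·.2.2)) := by
  simp only [oddBodyB, odList, vCell, cCell]
  split_ifs <;> simp


def rowB (rgb_values : List String) (grid_points : List (Int × Int)) (cols rows r : Int) :
    List ((Int × Int) × String × Bool) :=
  (PySem.List.pyRange 0 cols 1).flatMap (evList rgb_values grid_points cols r)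
    ++ (if r < rows - 1 then (PySem.List.pyRange 0 cols 1).flatMap (odList rgb_values grid_points cols r) else [])
-- ---- fold characterizations of the loops ----
lemma foldA_inner (g2 : List (List (Int × Int))) (c2 : List (List String)) (nc r : Int)
    (st : List (Int × Int) × List String × List Bool) :
    (PySem.List.pyRange 0 nc 1).foldl (innerBodyA g2 c2 r) st
    = (st.1 ++ ((PySem.List.pyRange 0 nc 1).map (cellA g2 c2 r)).map (·.1),
       st.2.1 ++ ((PySem.List.pyRange 0 nc 1).map (cellA g2 c2 r)).map (·.2.1),
       st.2.2 ++ ((PySem.List.pyRange 0 nc 1).map (cellA g2 c2 r)).map (·.2.2)) := by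
  refine Eq.trans (PySem.List.foldl_congr_mem _ _ _ _ (fun acc c _ => innerBodyA_eq g2 c2 r acc c))
    (Eq.trans (foldl3_map (PySem.List.pyRange 0 nc 1) (cellA g2 c2 r) st) ?_)
  simp [List.map_map, Function.comp_def]

lemma foldB_even (rv : List String) (gp : List (Int × Int)) (cols r : Int)
    (st : List (Int × Int) × List String × List Bool) :
    (PySem.List.pyRange 0 cols 1).foldl (evenBodyB rv gp cols r) st
    = (st.1 ++ ((PySem.List.pyRange 0 cols 1).flatMap (evList rv gp cols r)).map (·.1),
       st.2.1 ++ ((PySem.List.pyRange 0 cols 1).flatMap (evList rv gp cols r)).map (·.2.1),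
       st.2.2 ++ ((PySem.List.pyRange 0 cols 1).flatMap (evList rv gp cols r)).map (·.2.2)) := by
  exact Eq.trans (PySem.List.foldl_congr_mem _ _ _ _ (fun acc c _ => evenBodyB_eq rv gp cols r acc c))
    (foldl3_flat _ (evList rv gp cols r) st)

lemma foldB_odd (rv : List String) (gp : List (Int × Int)) (cols r : Int)
    (st : List (Int × Int) × List String × List Bool) :
    (PySem.List.pyRange 0 cols 1).foldl (oddBodyB rv gp cols r) st
    = (st.1 ++ ((PySem.List.pyRange 0 cols 1).flatMap (odList rv gp cols r)).map (·.1),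
       st.2.1 ++ ((PySem.List.pyRange 0 cols 1).flatMap (odList rv gp cols r)).map (·.2.1),
       st.2.2 ++ ((PySem.List.pyRange 0 cols 1).flatMap (odList rv gp cols r)).map (·.2.2)) := by
  exact Eq.trans (PySem.List.foldl_congr_mem _ _ _ _ (fun acc c _ => oddBodyB_eq rv gp cols r acc c))
    (foldl3_flat _ (odList rv gp cols r) st)

-- ---- flat-list views of the two ports ----
def grid2 (grid_points : List (Int × Int)) (cols rows : Int) : List (List (Int × Int)) :=
  (PySem.List.pyRange 0 rows 1).map (fun r =>
    (PySem.List.pyRange 0 cols 1).map (fun c => PySem.List.pyGetD grid_points (r * cols + c) (0, 0)))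

def color2 (rgb_values : List String) (cols rows : Int) : List (List String) :=
  (PySem.List.pyRange 0 rows 1).map (fun r =>
    (PySem.List.pyRange 0 cols 1).map (fun c => PySem.List.pyGetD rgb_values (r * cols + c) ""))

def flatA (rgb_values : List String) (grid_points : List (Int × Int)) (cols rows : Int) :
    List ((Int × Int) × String × Bool) :=
  (PySem.List.pyRange 0 (2 * rows - 1) 1).flatMap (fun r =>
    (PySem.List.pyRange 0 (2 * cols - 1) 1).map
      (cellA (grid2 grid_points cols rows) (color2 rgb_values cols rows) r))

def flatB (rgb_values : List String) (grid_points : List (Int × Int)) (cols rows : Int) :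
    List ((Int × Int) × String × Bool) :=
  (PySem.List.pyRange 0 rows 1).flatMap (fun r =>
    (PySem.List.pyRange 0 cols 1).flatMap (evList rgb_values grid_points cols r)
      ++ (if r < rows - 1 then (PySem.List.pyRange 0 cols 1).flatMap (odList rgb_values grid_points cols r) else []))

lemma A_flat (rv : List String) (gp : List (Int × Int)) (cols rows : Int) :
    apply_blur rv gp cols rows
    = ((flatA rv gp cols rows).map (·.2.1), (flatA rv gp cols rows).map (·.1),
       (flatA rv gp cols rows).map (·.2.2)) := by
  have h := Eq.trans (PySem.List.foldl_congr_mem (PySem.List.pyRange 0 (2 * rows - 1) 1) _ _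
      (([], [], []) : List (Int × Int) × List String × List Bool)
      (fun acc r _ => foldA_inner (grid2 gp cols rows) (color2 rv cols rows) (2 * cols - 1) r acc))
    (foldl3_flat _ (fun r => (PySem.List.pyRange 0 (2 * cols - 1) 1).map
      (cellA (grid2 gp cols rows) (color2 rv cols rows) r)) ([], [], []))
  show (((PySem.List.pyRange 0 (2 * rows - 1) 1).foldl (fun st r =>
        (PySem.List.pyRange 0 (2 * cols - 1) 1).foldl
          (innerBodyA (grid2 gp cols rows) (color2 rv cols rows) r) st)
        (([], [], []) : List (Int × Int) × List String × List Bool)).2.1, ((PySem.List.pyRange 0 (2 * rows - 1) 1).foldl (fun st r =>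
        (PySem.List.pyRange 0 (2 * cols - 1) 1).foldl
          (innerBodyA (grid2 gp cols rows) (color2 rv cols rows) r) st)
        (([], [], []) : List (Int × Int) × List String × List Bool)).1, ((PySem.List.pyRange 0 (2 * rows - 1) 1).foldl (fun st r =>
        (PySem.List.pyRange 0 (2 * cols - 1) 1).foldl
          (innerBodyA (grid2 gp cols rows) (color2 rv cols rows) r) st)
        (([], [], []) : List (Int × Int) × List String × List Bool)).2.2) = _
  rw [h]
  simp [flatA]

lemma B_flat (rv : List String) (gp : List (Int × Int)) (cols rows : Int) :
    apply_blur_alt rv gp cols rows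
    = ((flatB rv gp cols rows).map (·.2.1), (flatB rv gp cols rows).map (·.1),
       (flatB rv gp cols rows).map (·.2.2)) := by
  unfold apply_blur_alt
  have hbody : ∀ (st : List (Int × Int) × List String × List Bool) (r : Int), r ∈ PySem.List.pyRange 0 rows 1 →
      (if r < rows - 1 then
         (PySem.List.pyRange 0 cols 1).foldl (oddBodyB rv gp cols r)
           ((PySem.List.pyRange 0 cols 1).foldl (evenBodyB rv gp cols r) st)
       else (PySem.List.pyRange 0 cols 1).foldl (evenBodyB rv gp cols r) st)
      = (st.1 ++ (rowB rv gp cols rows r).map (·.1),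
         st.2.1 ++ (rowB rv gp cols rows r).map (·.2.1),
         st.2.2 ++ (rowB rv gp cols rows r).map (·.2.2)) := by
    intro st r _
    simp only [foldB_even]
    by_cases h : r < rows - 1
    · simp [h, foldB_odd, rowB, List.append_assoc]
    · simp [h, rowB]
  have h := Eq.trans (PySem.List.foldl_congr_mem (PySem.List.pyRange 0 rows 1) _ _
      (([], [], []) : List (Int × Int) × List String × List Bool)
      (fun acc r hr => hbody acc r hr))
    (foldl3_flat _ (rowB rv gp cols rows) ([], [], []))
  show (((PySem.List.pyRange 0 rows 1).foldl (fun st r =>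
        if r < rows - 1 then
          (PySem.List.pyRange 0 cols 1).foldl (oddBodyB rv gp cols r)
            ((PySem.List.pyRange 0 cols 1).foldl (evenBodyB rv gp cols r) st)
        else (PySem.List.pyRange 0 cols 1).foldl (evenBodyB rv gp cols r) st)
        (([], [], []) : List (Int × Int) × List String × List Bool)).2.1, ((PySem.List.pyRange 0 rows 1).foldl (fun st r =>
        if r < rows - 1 then
          (PySem.List.pyRange 0 cols 1).foldl (oddBodyB rv gp cols r)
            ((PySem.List.pyRange 0 cols 1).foldl (evenBodyB rv gp cols r) st)
        else (PySem.List.pyRange 0 cols 1).foldl (evenBodyB rv gp cols r) st)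
        (([], [], []) : List (Int × Int) × List String × List Bool)).1, ((PySem.List.pyRange 0 rows 1).foldl (fun st r =>
        if r < rows - 1 then
          (PySem.List.pyRange 0 cols 1).foldl (oddBodyB rv gp cols r)
            ((PySem.List.pyRange 0 cols 1).foldl (evenBodyB rv gp cols r) st)
        else (PySem.List.pyRange 0 cols 1).foldl (evenBodyB rv gp cols r) st)
        (([], [], []) : List (Int × Int) × List String × List Bool)).2.2) = _
  rw [h]
  have hr : rowB rv gp cols rows = fun r =>
      (PySem.List.pyRange 0 cols 1).flatMap (evList rv gp cols r)
        ++ (if r < rows - 1 then (PySem.List.pyRange 0 cols 1).flatMap (odList rv gp cols r) else []) := rfl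
  simp [flatB, hr]

-- ---- interleaving range(2n-1) into even/odd indexed halves ----
lemma natInter {α : Type} (m : Nat) (g : Nat → List α) :
    (List.range (2*m+1)).flatMap g
    = (List.range m).flatMap (fun r => g (2*r) ++ g (2*r+1)) ++ g (2*m) := by
  induction m with
  | zero => simp
  | succ m ih =>
    have h : 2*(m+1)+1 = (2*m+1)+1+1 := by ring
    rw [h, List.range_succ, List.range_succ (n := 2*m+1), List.flatMap_append, List.flatMap_append, ih,
        List.range_succ (n := m)]
    have e2 : 2*(m+1) = 2*m+2 := by omega
    simp [List.flatMap_append, List.append_assoc, e2]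

lemma interleave {α : Type} (n : Int) (f : Int → List α) :
    (PySem.List.pyRange 0 (2*n-1) 1).flatMap f
    = (PySem.List.pyRange 0 n 1).flatMap
        (fun r => f (2*r) ++ (if r < n - 1 then f (2*r+1) else [])) := by
  by_cases hn : n ≤ 0
  case pos =>
    rw [PySem.List.pyRange_one_eq_nil (by omega : (2*n-1:Int) ≤ 0),
        PySem.List.pyRange_one_eq_nil (by omega : n ≤ (0:Int))]
    rfl
  case neg =>
    obtain ⟨m, rfl⟩ : ∃ m : Nat, n = (m:Int) + 1 := ⟨(n-1).toNat, by omega⟩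
    rw [PySem.List.pyRange_one, PySem.List.pyRange_one]
    have h1 : ((2*((m:Int)+1)-1) - 0).toNat = 2*m+1 := by omega
    have h2 : (((m:Int)+1) - 0).toNat = m+1 := by omega
    rw [h1, h2, List.flatMap_map, List.flatMap_map, natInter m (fun k => f (0 + (k:Int))),
        List.range_succ, List.flatMap_append]
    simp only [List.flatMap_singleton]
    congr 1
    · exact List.flatMap_congr (fun k hk => by
        simp only [List.mem_range] at hk
        rw [if_pos (show (0:Int) + ((k:Nat):Int) < (m:Int)+1-1 by omega)]
        congr 1 <;> (congr 1; push_cast; ring))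
    · rw [if_neg (by omega), List.append_nil]
      congr 1
      push_cast
      ring

lemma interleave_map {α : Type} (n : Int) (g : Int → α) :
    (PySem.List.pyRange 0 (2*n-1) 1).map g
    = (PySem.List.pyRange 0 n 1).flatMap
        (fun c => [g (2*c)] ++ (if c < n - 1 then [g (2*c+1)] else [])) := by
  rw [List.map_eq_flatMap, interleave n (fun x => [g x])]

-- ---- parity arithmetic of A's target indices ----
lemma mod_two_mul (r : Int) : PySem.Int.mod (2*r) 2 = 0 := by
  rw [PySem.Int.mod_eq_emod_of_pos (by norm_num)]; omega

lemma mod_two_mul_add_one (r : Int) : PySem.Int.mod (2*r+1) 2 = 1 := by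
  rw [PySem.Int.mod_eq_emod_of_pos (by norm_num)]; omega

lemma fd_two_mul (r : Int) : PySem.Int.floordiv (2*r) 2 = r := by
  rw [PySem.Int.floordiv_eq_ediv_of_pos (by norm_num)]; omega

lemma fd_two_mul_add_one (r : Int) : PySem.Int.floordiv (2*r+1) 2 = r := by
  rw [PySem.Int.floordiv_eq_ediv_of_pos (by norm_num)]; omega

-- ---- 2D lookups reduce to flat lookups ----
lemma grid2_get (gp : List (Int × Int)) (cols rows r c : Int)
    (hr : 0 ≤ r) (hr2 : r < rows) (hc : 0 ≤ c) (hc2 : c < cols) :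
    PySem.List.pyGetD (PySem.List.pyGetD (grid2 gp cols rows) r []) c (0, 0)
    = ptB gp cols r c := by
  unfold grid2 ptB
  rw [PySem.List.pyGetD_map_pyRange_of_nonneg _ rows r [] hr hr2,
      PySem.List.pyGetD_map_pyRange_of_nonneg _ cols c (0, 0) hc hc2]

lemma color2_get (rv : List String) (cols rows r c : Int)
    (hr : 0 ≤ r) (hr2 : r < rows) (hc : 0 ≤ c) (hc2 : c < cols) :
    PySem.List.pyGetD (PySem.List.pyGetD (color2 rv cols rows) r []) c ""
    = PySem.List.pyGetD rv (r * cols + c) "" := by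
  unfold color2
  rw [PySem.List.pyGetD_map_pyRange_of_nonneg _ rows r [] hr hr2,
      PySem.List.pyGetD_map_pyRange_of_nonneg _ cols c "" hc hc2]

-- ---- A's cell at each parity class is B's cell ----
lemma cellA_ee (rv : List String) (gp : List (Int × Int)) (cols rows r c : Int)
    (hr : 0 ≤ r) (hr2 : r < rows) (hc : 0 ≤ c) (hc2 : c < cols) :
    cellA (grid2 gp cols rows) (color2 rv cols rows) (2*r) (2*c)
    = oCell rv gp cols r c := by
  simp only [cellA, oCell, mod_two_mul, fd_two_mul, and_self, if_true]
  rw [grid2_get gp cols rows r c hr hr2 hc hc2, color2_get rv cols rows r c hr hr2 hc hc2]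

lemma cellA_eo (rv : List String) (gp : List (Int × Int)) (cols rows r c : Int)
    (hr : 0 ≤ r) (hr2 : r < rows) (hc : 0 ≤ c) (hc2 : c < cols - 1) :
    cellA (grid2 gp cols rows) (color2 rv cols rows) (2*r) (2*c+1)
    = hCell rv gp cols r c := by
  simp only [cellA, hCell, rgbB, mod_two_mul, mod_two_mul_add_one, fd_two_mul, fd_two_mul_add_one]
  norm_num
  rw [grid2_get gp cols rows r c hr hr2 hc (by omega),
      grid2_get gp cols rows r (c+1) hr hr2 (by omega) (by omega),
      color2_get rv cols rows r c hr hr2 hc (by omega),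
      color2_get rv cols rows r (c+1) hr hr2 (by omega) (by omega)]
  exact ⟨⟨rfl, rfl⟩, rfl⟩

lemma cellA_oe (rv : List String) (gp : List (Int × Int)) (cols rows r c : Int)
    (hr : 0 ≤ r) (hr2 : r < rows - 1) (hc : 0 ≤ c) (hc2 : c < cols) :
    cellA (grid2 gp cols rows) (color2 rv cols rows) (2*r+1) (2*c)
    = vCell rv gp cols r c := by
  simp only [cellA, vCell, rgbB, mod_two_mul, mod_two_mul_add_one, fd_two_mul, fd_two_mul_add_one]
  norm_num
  rw [grid2_get gp cols rows r c hr (by omega) hc hc2,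
      grid2_get gp cols rows (r+1) c (by omega) (by omega) hc hc2,
      color2_get rv cols rows r c hr (by omega) hc hc2,
      color2_get rv cols rows (r+1) c (by omega) (by omega) hc hc2]
  exact ⟨⟨rfl, rfl⟩, rfl⟩

lemma cellA_oo (rv : List String) (gp : List (Int × Int)) (cols rows r c : Int)
    (hr : 0 ≤ r) (hr2 : r < rows - 1) (hc : 0 ≤ c) (hc2 : c < cols - 1) :
    cellA (grid2 gp cols rows) (color2 rv cols rows) (2*r+1) (2*c+1)
    = cCell rv gp cols r c := by
  simp only [cellA, cCell, rgbB, mod_two_mul_add_one, fd_two_mul_add_one]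
  norm_num
  rw [grid2_get gp cols rows r c hr (by omega) hc (by omega),
      grid2_get gp cols rows r (c+1) hr (by omega) (by omega) (by omega),
      grid2_get gp cols rows (r+1) c (by omega) (by omega) hc (by omega),
      grid2_get gp cols rows (r+1) (c+1) (by omega) (by omega) (by omega) (by omega),
      color2_get rv cols rows r c hr (by omega) hc (by omega),
      color2_get rv cols rows r (c+1) hr (by omega) (by omega) (by omega),
      color2_get rv cols rows (r+1) c (by omega) (by omega) hc (by omega),
      color2_get rv cols rows (r+1) (c+1) (by omega) (by omega) (by omega) (by omega)]
  refine ⟨⟨?_, ?_⟩, ?_⟩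
  · exact congrArg pyRound4 (by ring)
  · exact congrArg pyRound4 (by ring)
  · refine congrArg₂ (rgbToHex · · _) ?_ ?_ |>.trans (congrArg _ ?_) <;> omega

-- ---- the core: A's flat cell list is B's ----
lemma flatA_eq_flatB (rv : List String) (gp : List (Int × Int)) (cols rows : Int) :
    flatA rv gp cols rows = flatB rv gp cols rows := by
  unfold flatA flatB
  rw [interleave rows]
  refine List.flatMap_congr (fun r hr => ?_)
  rw [PySem.List.mem_pyRange_one] at hr
  have heven : (PySem.List.pyRange 0 (2*cols-1) 1).map
      (cellA (grid2 gp cols rows) (color2 rv cols rows) (2*r))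
      = (PySem.List.pyRange 0 cols 1).flatMap (evList rv gp cols r) := by
    rw [interleave_map cols]
    refine List.flatMap_congr (fun c hc => ?_)
    rw [PySem.List.mem_pyRange_one] at hc
    unfold evList
    by_cases h : c < cols - 1
    · rw [if_pos h, if_pos h,
        cellA_ee rv gp cols rows r c hr.1 hr.2 hc.1 hc.2,
        cellA_eo rv gp cols rows r c hr.1 hr.2 hc.1 h]
    · rw [if_neg h, if_neg h, cellA_ee rv gp cols rows r c hr.1 hr.2 hc.1 hc.2]
  have hodd : r < rows - 1 → (PySem.List.pyRange 0 (2*cols-1) 1).map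
      (cellA (grid2 gp cols rows) (color2 rv cols rows) (2*r+1))
      = (PySem.List.pyRange 0 cols 1).flatMap (odList rv gp cols r) := by
    intro hrr
    rw [interleave_map cols]
    refine List.flatMap_congr (fun c hc => ?_)
    rw [PySem.List.mem_pyRange_one] at hc
    unfold odList
    by_cases h : c < cols - 1
    · rw [if_pos h, if_pos h,
        cellA_oe rv gp cols rows r c hr.1 hrr hc.1 hc.2,
        cellA_oo rv gp cols rows r c hr.1 hrr hc.1 h]
    · rw [if_neg h, if_neg h, cellA_oe rv gp cols rows r c hr.1 hrr hc.1 hc.2]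
  by_cases hrr : r < rows - 1
  · rw [if_pos hrr, if_pos hrr, heven, hodd hrr]
  · rw [if_neg hrr, if_neg hrr, heven]

-- ===== VERDICT (by name: the statement is the Claim_ definition above) =====
theorem apply_blur_spec : Claim_equal_apply_blur := by
  intro rgb_values grid_points cols rows _ _
  unfold Spec_apply_blur
  rw [A_flat, B_flat, flatA_eq_flatB]
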